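-- pv_equiv track=rewrite | github.com/pycodermegax/leo-editor | leo/core/leoTest2.py | class_name
-- ===== SOURCE A (Python) =====
-- def class_name(command_name):
--     """Convert the command name to a class name."""
--     # This method is not used.
--     result = []
--     parts = command_name.split('-')
--     for part in parts:
--         s = part.replace('(','').replace(')','')
--         inner_parts = s.split(' ')
--         result.append(''.join([z.capitalize() for z in inner_parts]))
--     return ''.join(result)
-- ===== SOURCE B (Python) =====
-- def class_name(command_name):
--     """Convert the command name to a class name (single pass over characters)."""
--     out = []
--     start = True
--     for c in command_name:
--         if c in '()':
--             continue
--         if c in '- ':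
--             start = True
--         else:
--             out.append(c.upper() if start else c.lower())
--             start = False
--     return ''.join(out)
-- ===== Notes on version B (the rewrite author's own statement) =====
-- stated objective: simpler
-- what changed: Replaces A's nested dash-split / per-part paren-replace / space-split / capitalize / double-join pipeline with a single character-at-a-time pass that skips parentheses and keeps a word-start flag to pick upper or lower case.
import Mathlib
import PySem

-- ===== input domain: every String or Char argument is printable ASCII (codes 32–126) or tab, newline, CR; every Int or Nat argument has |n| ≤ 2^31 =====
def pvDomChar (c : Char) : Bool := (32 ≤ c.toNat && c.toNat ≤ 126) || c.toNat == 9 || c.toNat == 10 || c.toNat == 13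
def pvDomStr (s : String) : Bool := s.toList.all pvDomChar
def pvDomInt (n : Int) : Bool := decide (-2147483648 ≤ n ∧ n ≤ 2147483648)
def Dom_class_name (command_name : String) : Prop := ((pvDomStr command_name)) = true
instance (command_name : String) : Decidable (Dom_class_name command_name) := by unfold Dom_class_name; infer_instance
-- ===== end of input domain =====

-- B rewrites A's nested dash-split / paren-strip / space-split / capitalize / join pipeline as one
-- character-at-a-time pass keeping a word-start flag (objective: simpler decomposition, same cost).

-- ===== PORT A =====
-- str.capitalize, exact on ASCII (first char uppercased, rest lowercased)
def pyCapitalize (cs : List Char) : List Char :=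
  match cs with
  | [] => []
  | c :: rest => PySem.Chars.upperChar c :: PySem.Chars.lower rest

def class_name (command_name : String) : String :=
  String.mk (PySem.Chars.join []
    ((PySem.Chars.splitOn command_name.toList ['-']).map (fun part =>
      PySem.Chars.join []
        ((PySem.Chars.splitOn
            (PySem.Chars.replace (PySem.Chars.replace part ['('] []) [')'] []) [' ']).map
          pyCapitalize))))

-- ===== PORT B =====
-- one step of B's loop: state = (output so far, at-start-of-word flag)
def bStep (st : List Char × Bool) (c : Char) : List Char × Bool :=
  if c = '(' ∨ c = ')' then st
  else if c = '-' ∨ c = ' ' then (st.1, true)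
  else (st.1 ++ [if st.2 then PySem.Chars.upperChar c else PySem.Chars.lowerChar c], false)

def class_name_alt (command_name : String) : String :=
  String.mk (command_name.toList.foldl bStep ([], true)).1

-- ===== PRECONDITION & SPEC =====
def Spec_class_name (command_name : String) (out : String) : Prop := out = class_name_alt command_name
instance (command_name : String) (out : String) : Decidable (Spec_class_name command_name out) := by unfold Spec_class_name; infer_instance

-- ===== CLAIM (what is proved, stated in full; the proofs are below) =====
def Claim_equal_class_name : Prop := ∀ (command_name : String), Dom_class_name command_name → Spec_class_name command_name (class_name command_name)

-- ===== LEMMAS AND PROOFS =====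

-- keep every char that is not `p`
def noChar (p : Char) (c : Char) : Bool := !(c == p)

-- single-delimiter split, as (first piece, remaining pieces)
def split1 (d : Char) : List Char → List Char × List (List Char)
  | [] => ([], [])
  | c :: cs =>
      let r := split1 d cs
      if c = d then ([], r.1 :: r.2) else (c :: r.1, r.2)

-- tokens on '-' or ' ' at once, as (first token, remaining tokens)
def tok : List Char → List Char × List (List Char)
  | [] => ([], [])
  | c :: cs =>
      let r := tok cs
      if c = '-' ∨ c = ' ' then ([], r.1 :: r.2) else (c :: r.1, r.2)

-- B's loop as front recursion
def gB : List Char → Bool → List Char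
  | [], _ => []
  | c :: cs, b =>
      if c = '(' ∨ c = ')' then gB cs b
      else if c = '-' ∨ c = ' ' then gB cs true
      else (if b then PySem.Chars.upperChar c else PySem.Chars.lowerChar c) :: gB cs false

theorem replace_go_filter (p : Char) : ∀ (fuel : Nat) (l acc : List Char), l.length ≤ fuel →
    PySem.Chars.replace.go [p] [] fuel l acc = acc.reverse ++ l.filter (noChar p) := by
  intro fuel
  induction fuel with
  | zero =>
      intro l acc h
      have : l = [] := List.length_eq_zero_iff.mp (Nat.le_zero.mp h)
      subst this; simp [PySem.Chars.replace.go]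
  | succ n ih =>
      intro l acc h
      cases l with
      | nil => simp [PySem.Chars.replace.go]
      | cons c t =>
          by_cases hc : c = p
          · subst hc
            have hgo : PySem.Chars.replace.go [c] [] (n+1) (c::t) acc
                = PySem.Chars.replace.go [c] [] n t acc := by
              simp [PySem.Chars.replace.go, List.isPrefixOf]
            rw [hgo, ih t acc (by simpa using h)]
            simp [List.filter_cons, noChar]
          · have hbe : (p == c) = false := by
              simpa using fun h' => hc h'.symm
            have hgo : PySem.Chars.replace.go [p] [] (n+1) (c::t) acc
                = PySem.Chars.replace.go [p] [] n t (c :: acc) := by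
              simp [PySem.Chars.replace.go, List.isPrefixOf, hbe]
            rw [hgo, ih t (c :: acc) (by simpa using h)]
            simp [noChar, hc]

theorem replace_filter (p : Char) (l : List Char) :
    PySem.Chars.replace l [p] [] = l.filter (noChar p) := by
  simp [PySem.Chars.replace, replace_go_filter p l.length l [] le_rfl]

theorem splitOn_go_split1 (d : Char) : ∀ (fuel : Nat) (l cur : List Char) (acc : List (List Char)),
    l.length ≤ fuel →
    PySem.Chars.splitOn.go [d] fuel l cur acc =
      acc.reverse ++ (cur.reverse ++ (split1 d l).1) :: (split1 d l).2 := by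
  intro fuel
  induction fuel with
  | zero =>
      intro l cur acc h
      have : l = [] := List.length_eq_zero_iff.mp (Nat.le_zero.mp h)
      subst this; simp [PySem.Chars.splitOn.go, split1]
  | succ n ih =>
      intro l cur acc h
      cases l with
      | nil => simp [PySem.Chars.splitOn.go, split1]
      | cons c t =>
          by_cases hc : c = d
          · subst hc
            have hgo : PySem.Chars.splitOn.go [c] (n+1) (c::t) cur acc
                = PySem.Chars.splitOn.go [c] n t [] (cur.reverse :: acc) := by
              simp [PySem.Chars.splitOn.go, List.isPrefixOf]
            rw [hgo, ih t [] (cur.reverse :: acc) (by simpa using h)]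
            simp [split1]
          · have hbe : (d == c) = false := by
              simpa using fun h' => hc h'.symm
            have hgo : PySem.Chars.splitOn.go [d] (n+1) (c::t) cur acc
                = PySem.Chars.splitOn.go [d] n t (c :: cur) acc := by
              simp [PySem.Chars.splitOn.go, List.isPrefixOf, hbe]
            rw [hgo, ih t (c :: cur) acc (by simpa using h)]
            simp [split1, hc]

theorem splitOn_split1 (d : Char) (l : List Char) :
    PySem.Chars.splitOn l [d] = (split1 d l).1 :: (split1 d l).2 := by
  simp [PySem.Chars.splitOn, splitOn_go_split1 d (l.length + 1) l [] [] (Nat.le_succ _)]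

theorem join_nil_flatten (l : List (List Char)) : PySem.Chars.join [] l = l.flatten := by
  show List.intercalate [] l = l.flatten
  induction l with
  | nil => rfl
  | cons h t ih => cases t <;> simp_all [List.intercalate, List.intersperse]

-- filtering a kept character commutes with splitting
theorem split1_filter (d : Char) (q : Char → Bool) (hq : q d = true) (l : List Char) :
    split1 d (l.filter q) = ((split1 d l).1.filter q, (split1 d l).2.map (List.filter q)) := by
  induction l with
  | nil => simp [split1]
  | cons c t ih =>
      by_cases hc : c = d
      · subst hc; simp [split1, hq, List.filter, ih]
      · by_cases hqc : q c = true
        · simp [split1, List.filter, hqc, hc, ih]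
        · simp only [Bool.not_eq_true] at hqc
          simp [split1, List.filter, hqc, hc, ih]

-- flattening the space-split of every dash-part gives the combined tokens
theorem nested_split_tok (l : List Char) :
    ((split1 ' ' (split1 '-' l).1).1 :: (split1 ' ' (split1 '-' l).1).2)
      ++ (split1 '-' l).2.flatMap (fun p => (split1 ' ' p).1 :: (split1 ' ' p).2)
    = (tok l).1 :: (tok l).2 := by
  induction l with
  | nil => simp [split1, tok]
  | cons c t ih =>
      by_cases hd : c = '-'
      · subst hd; simpa [split1, tok] using ih
      · by_cases hs : c = ' '
        · subst hs; simpa [split1, tok, hd] using ih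
        · have h1 : (split1 ' ' (split1 '-' t).1).1 = (tok t).1 := congrArg List.head! ih
          have h2 : (split1 ' ' (split1 '-' t).1).2
              ++ (split1 '-' t).2.flatMap (fun p => (split1 ' ' p).1 :: (split1 ' ' p).2)
              = (tok t).2 := by
            have := congrArg List.tail ih
            simpa using this
          simp [split1, tok, hd, hs, h1, ← h2]

def noParen (c : Char) : Bool := noChar '(' c && noChar ')' c

-- capitalized tokens flattened = B's recursion, on paren-free input
theorem tok_cap_gB : ∀ (l : List Char), (∀ c ∈ l, noParen c = true) → ∀ (b : Bool),
    (if b then pyCapitalize (tok l).1 else PySem.Chars.lower (tok l).1)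
      ++ ((tok l).2.map pyCapitalize).flatten = gB l b := by
  intro l
  induction l with
  | nil => intro _ b; cases b <;> simp [tok, pyCapitalize, PySem.Chars.lower, gB]
  | cons c t ih =>
      intro hnp b
      have hc : noParen c = true := hnp c (List.mem_cons_self ..)
      have hct : ∀ x ∈ t, noParen x = true := fun x hx => hnp x (List.mem_cons_of_mem _ hx)
      have hparen : ¬(c = '(' ∨ c = ')') := by
        rintro (rfl | rfl) <;> simp [noParen, noChar] at hc
      by_cases hdel : c = '-' ∨ c = ' '
      · have := ih hct true
        simp only [tok, gB, if_pos hdel, if_neg hparen]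
        cases b <;> simpa [pyCapitalize, PySem.Chars.lower] using this
      · have := ih hct false
        simp only [tok, gB, if_neg hdel, if_neg hparen]
        cases b <;> simp_all [pyCapitalize, PySem.Chars.lower]

-- B's foldl skips parens and otherwise appends like gB
theorem foldl_bStep_gB : ∀ (l acc : List Char) (b : Bool),
    (l.foldl bStep (acc, b)).1 = acc ++ gB l b := by
  intro l
  induction l with
  | nil => intro acc b; simp [gB]
  | cons c t ih =>
      intro acc b
      by_cases hp : c = '(' ∨ c = ')'
      · simp [List.foldl_cons, bStep, hp, gB, ih]
      · by_cases hd : c = '-' ∨ c = ' '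
        · simp [List.foldl_cons, bStep, hp, hd, gB, ih]
        · simp [List.foldl_cons, bStep, hp, hd, gB, ih]

-- gB ignores parens, so it only sees the paren-free characters
theorem gB_filter_noParen : ∀ (l : List Char) (b : Bool), gB l b = gB (l.filter noParen) b := by
  intro l
  induction l with
  | nil => intro b; simp
  | cons c t ih =>
      intro b
      by_cases hp : c = '(' ∨ c = ')'
      · have : noParen c = false := by rcases hp with rfl | rfl <;> simp [noParen, noChar]
        simp [gB, hp, this, ih]
      · have hnp : noParen c = true := by
          simp [noParen, noChar]
          exact ⟨fun h => hp (Or.inl h), fun h => hp (Or.inr h)⟩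
        by_cases hd : c = '-' ∨ c = ' ' <;>
          simp [gB, hp, hd, hnp, ih]

-- the two paren-replaces are one filter
theorem replace2_filter (p : List Char) :
    PySem.Chars.replace (PySem.Chars.replace p ['('] []) [')'] [] = p.filter noParen := by
  rw [replace_filter, replace_filter, List.filter_filter]
  congr 1; funext a; simp [noParen, Bool.and_comm]

-- A's per-part pipeline, flattened over a list of parts
theorem a_parts_flatten (parts : List (List Char)) :
    (parts.map (fun part =>
      PySem.Chars.join []
        ((PySem.Chars.splitOn
            (PySem.Chars.replace (PySem.Chars.replace part ['('] []) [')'] []) [' ']).map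
          pyCapitalize))).flatten
    = (((parts.map (List.filter noParen)).flatMap
          (fun p => (split1 ' ' p).1 :: (split1 ' ' p).2)).map pyCapitalize).flatten := by
  induction parts with
  | nil => simp
  | cons h t ih =>
      simp only [List.map_cons, List.flatten_cons, ih, List.flatMap_cons, List.map_append,
        List.flatten_append]
      simp [replace2_filter, join_nil_flatten, splitOn_split1]

-- ===== VERDICT (by name: the statement is the Claim_ definition above) =====
theorem class_name_spec : Claim_equal_class_name := by
  intro s _
  unfold Spec_class_name class_name class_name_alt
  rw [foldl_bStep_gB]
  congr 1
  rw [List.nil_append, gB_filter_noParen]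
  have hpf : ∀ c ∈ s.toList.filter noParen, noParen c = true :=
    fun c hc => (List.mem_filter.mp hc).2
  rw [← tok_cap_gB (s.toList.filter noParen) hpf true]
  have hflat : (if true = true then pyCapitalize (tok (s.toList.filter noParen)).1
      else PySem.Chars.lower (tok (s.toList.filter noParen)).1)
      ++ ((tok (s.toList.filter noParen)).2.map pyCapitalize).flatten
      = ((((tok (s.toList.filter noParen)).1 :: (tok (s.toList.filter noParen)).2).map
          pyCapitalize)).flatten := by
    simp
  rw [hflat, ← nested_split_tok, split1_filter '-' noParen (by decide)]
  rw [join_nil_flatten, splitOn_split1, a_parts_flatten]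
  simp
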